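-- pv_equiv track=rewrite | github.com/liwen17320273738/agent-hub | backend/scripts/swebench/patch_utils.py | _find_first_diff_start
-- ===== SOURCE A (Python) =====
-- from typing import List, Optional, Tuple
--
-- def _find_first_diff_start(text: str) -> Optional[int]:
--     git_idx = text.find("\ndiff --git ")
--     if git_idx == -1 and text.startswith("diff --git "):
--         git_idx = 0
--     elif git_idx != -1:
--         git_idx += 1
--
--     minus_idx = text.find("\n--- a/")
--     if minus_idx == -1 and text.startswith("--- a/"):
--         minus_idx = 0
--     elif minus_idx != -1:
--         minus_idx += 1
--
--     candidates = [i for i in (git_idx, minus_idx) if i is not None and i >= 0]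
--     return min(candidates) if candidates else None
-- ===== SOURCE B (Python) =====
-- from typing import Optional
--
-- def _find_first_diff_start(text: str) -> Optional[int]:
--     at_line_start = True
--     for i, ch in enumerate(text):
--         if at_line_start and (text.startswith("diff --git ", i) or text.startswith("--- a/", i)):
--             return i
--         at_line_start = ch == "\n"
--     return None
-- ===== Notes on version B (the rewrite author's own statement) =====
-- stated objective: alternative
-- what changed: Replaced the two whole-text substring searches for "\n"+marker plus startswith fixups and a min over candidates by a single forward scan that tracks whether the current index is a line start and returns the first line start where either marker is a prefix.
-- intended difference: On texts that start with "diff --git " (resp. "--- a/") and also contain the same marker again right after a newline, A returns the index of the later occurrence (its startswith-at-0 branch only fires when the find fails), while B returns the intended 0, the position of the first diff header. — e.g. on _find_first_diff_start("diff --git a\ndiff --git b"): A returns some 13, B returns some 0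
import Mathlib
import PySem

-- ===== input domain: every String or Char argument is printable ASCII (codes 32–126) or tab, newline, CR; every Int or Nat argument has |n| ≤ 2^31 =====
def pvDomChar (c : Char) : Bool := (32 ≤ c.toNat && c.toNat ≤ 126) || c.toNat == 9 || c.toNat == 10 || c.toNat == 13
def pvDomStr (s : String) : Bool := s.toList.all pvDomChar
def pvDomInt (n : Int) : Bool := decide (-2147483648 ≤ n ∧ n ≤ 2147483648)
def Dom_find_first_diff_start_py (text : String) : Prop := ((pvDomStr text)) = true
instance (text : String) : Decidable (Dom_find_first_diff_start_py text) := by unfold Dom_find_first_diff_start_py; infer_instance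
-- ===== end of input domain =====

-- ===== PORT A =====
-- B replaces A's two global substring searches + min with one forward scan over line starts;
-- on texts that BOTH start with a marker AND contain it again after a newline, A wrongly skips
-- position 0 (see D_ below); B returns the intended 0 there.
def find_first_diff_start_py (text : String) : Option Int :=
  let git_idx0 : Int := PySem.Str.find text "\ndiff --git "
  let git_idx : Int :=
    if git_idx0 = -1 ∧ PySem.Str.startswith text "diff --git " = true then 0
    else if git_idx0 ≠ -1 then git_idx0 + 1
    else git_idx0
  let minus_idx0 : Int := PySem.Str.find text "\n--- a/"
  let minus_idx : Int :=
    if minus_idx0 = -1 ∧ PySem.Str.startswith text "--- a/" = true then 0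
    else if minus_idx0 ≠ -1 then minus_idx0 + 1
    else minus_idx0
  -- candidates = [i for i in (git_idx, minus_idx) if i is not None and i >= 0]  (ints are never None)
  let candidates : List Int := [git_idx, minus_idx].filter (fun i => decide (0 ≤ i))
  -- min(candidates) if candidates else None
  PySem.List.min? candidates (fun x => x)

-- ===== PORT B =====
def pvM1 : List Char := "diff --git ".toList
def pvM2 : List Char := "--- a/".toList

-- the for-loop of Source B: i is the running index, atStart whether i is at a line start;
-- text.startswith(marker, i) is a prefix test on the remaining suffix
def pvAltGo (s : List Char) (i : Int) (atStart : Bool) : Option Int :=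
  match s with
  | [] => none
  | c :: rest =>
    if atStart && (PySem.Chars.startswith (c :: rest) pvM1 || PySem.Chars.startswith (c :: rest) pvM2) then
      some i
    else
      pvAltGo rest (i + 1) (c == '\n')

def find_first_diff_start_py_alt (text : String) : Option Int :=
  pvAltGo text.toList 0 true

-- ===== PRECONDITION & SPEC =====
-- On texts that start with one of the markers and also contain "\n"+the same marker later, A
-- returns the position of the LATER occurrence while B returns the intended 0: a text starting
-- with a diff header has its first header at index 0.
def D_find_first_diff_start_py (text : String) : Prop :=
  (PySem.Str.startswith text "diff --git " = true ∧ PySem.Str.isIn "\ndiff --git " text = true) ∨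
  (PySem.Str.startswith text "--- a/" = true ∧ PySem.Str.isIn "\n--- a/" text = true)
instance (text : String) : Decidable (D_find_first_diff_start_py text) := by
  unfold D_find_first_diff_start_py; infer_instance

def Spec_find_first_diff_start_py (text : String) (out : Option Int) : Prop :=
  ¬ D_find_first_diff_start_py text → out = find_first_diff_start_py_alt text
instance (text : String) (out : Option Int) : Decidable (Spec_find_first_diff_start_py text out) := by
  unfold Spec_find_first_diff_start_py; infer_instance

def pvDiffWitness_find_first_diff_start_py : String := "diff --git a\ndiff --git b"
def pvDiffWitnessOut_find_first_diff_start_py : (Option Int) × (Option Int) := (some 13, some 0)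

-- ===== CLAIM (what is proved, stated in full; the proofs are below) =====
def Claim_unchanged_find_first_diff_start_py : Prop := ∀ (text : String), Dom_find_first_diff_start_py text → Spec_find_first_diff_start_py text (find_first_diff_start_py text)
def Claim_changed_find_first_diff_start_py : Prop := Dom_find_first_diff_start_py (pvDiffWitness_find_first_diff_start_py) ∧ D_find_first_diff_start_py (pvDiffWitness_find_first_diff_start_py) ∧ find_first_diff_start_py (pvDiffWitness_find_first_diff_start_py) = pvDiffWitnessOut_find_first_diff_start_py.1 ∧ find_first_diff_start_py_alt (pvDiffWitness_find_first_diff_start_py) = pvDiffWitnessOut_find_first_diff_start_py.2 ∧ pvDiffWitnessOut_find_first_diff_start_py.1 ≠ pvDiffWitnessOut_find_first_diff_start_py.2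
def Claim_exact_find_first_diff_start_py : Prop := ∀ (text : String), Dom_find_first_diff_start_py text → D_find_first_diff_start_py text → find_first_diff_start_py text ≠ find_first_diff_start_py_alt text

-- ===== LEMMAS AND PROOFS =====

lemma pvnl1 : "\ndiff --git ".toList = '\n' :: pvM1 := by decide
lemma pvnl2 : "\n--- a/".toList = '\n' :: pvM2 := by decide
lemma pvM1_ne_nil : pvM1 ≠ [] := by decide
lemma pvM2_ne_nil : pvM2 ≠ [] := by decide

-- A's per-marker candidate and A's computation, rephrased over the character list
def pvCand (m : List Char) (s : List Char) : Int :=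
  let g0 : Int := PySem.Chars.find s ('\n' :: m)
  if g0 = -1 ∧ m.isPrefixOf s = true then 0 else if g0 ≠ -1 then g0 + 1 else g0

def pvACore (s : List Char) : Option Int :=
  PySem.List.min? (([pvCand pvM1 s, pvCand pvM2 s]).filter (fun i => decide (0 ≤ i))) (fun x => x)

lemma pvA_eq (text : String) : find_first_diff_start_py text = pvACore text.toList := by
  simp only [find_first_diff_start_py, pvACore, pvCand, PySem.Str.find_eq,
    PySem.Str.startswith_eq, PySem.Chars.startswith, pvnl1, pvnl2, pvM1, pvM2]

lemma pvCand_abs {m s : List Char} (hP : ¬ m <+: s)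
    (hI : PySem.Chars.find s ('\n' :: m) = -1) : pvCand m s = -1 := by
  simp [pvCand, hI, List.isPrefixOf_iff_prefix, hP]

lemma pvCand_zero {m s : List Char} (hP : m <+: s)
    (hI : PySem.Chars.find s ('\n' :: m) = -1) : pvCand m s = 0 := by
  simp [pvCand, hI, List.isPrefixOf_iff_prefix, hP]

lemma pvCand_pos {m s : List Char} (hI : PySem.Chars.find s ('\n' :: m) ≠ -1) :
    pvCand m s = PySem.Chars.find s ('\n' :: m) + 1 := by
  simp [pvCand, hI]

-- p is a "hit" for marker m: a line start (p = 0 counts iff b) where m is a prefix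
def pvHitM (m : List Char) (b : Bool) (s : List Char) (p : Nat) : Bool :=
  (if p = 0 then b else s[p-1]? == some '\n') && m.isPrefixOf (s.drop p)

def pvHit (b : Bool) (s : List Char) (p : Nat) : Bool :=
  pvHitM pvM1 b s p || pvHitM pvM2 b s p

lemma pvHitM_succ (m : List Char) (b : Bool) (c : Char) (rest : List Char) (p : Nat) :
    pvHitM m b (c :: rest) (p + 1) = pvHitM m (c == '\n') rest p := by
  cases p with
  | zero => simp [pvHitM]
  | succ q => simp [pvHitM]

lemma pvAltGo_eq (s : List Char) : ∀ (b : Bool) (i : Int),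
    pvAltGo s i b = ((List.range s.length).find? (pvHit b s)).map (fun p => (p : Int) + i) := by
  induction s with
  | nil => intro b i; simp [pvAltGo]
  | cons c rest ih =>
    intro b i
    simp only [pvAltGo]
    have hcond : (b && (PySem.Chars.startswith (c :: rest) pvM1 ||
        PySem.Chars.startswith (c :: rest) pvM2)) = pvHit b (c :: rest) 0 := by
      simp [pvHit, pvHitM, PySem.Chars.startswith, Bool.and_or_distrib_left]
    by_cases h0 : pvHit b (c :: rest) 0 = true
    · rw [hcond, if_pos h0, List.length_cons, List.range_succ_eq_map,
        List.find?_cons_of_pos h0]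
      simp
    · rw [hcond, if_neg h0, ih (c == '\n') (i + 1), List.length_cons,
        List.range_succ_eq_map, List.find?_cons_of_neg (by simpa using h0), List.find?_map]
      have hcomp : (pvHit b (c :: rest)) ∘ Nat.succ = pvHit (c == '\n') rest := by
        funext p
        simp [Function.comp, pvHit, pvHitM_succ]
      rw [hcomp]
      rcases hf : List.find? (pvHit (c == '\n') rest) (List.range rest.length) with _ | a <;>
        simp
      ring

lemma pv_find?_range_none {q : Nat → Bool} {n : Nat} (h : ∀ j < n, q j = false) :
    (List.range n).find? q = none := by
  simp only [List.find?_eq_none, List.mem_range]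
  intro x hx
  simp [h x hx]

lemma pv_find?_range_some {q : Nat → Bool} {n p : Nat} (hp : p < n) (hq : q p = true)
    (hmin : ∀ j < p, q j = false) : (List.range n).find? q = some p := by
  induction n with
  | zero => omega
  | succ k ih =>
    rw [List.range_succ, List.find?_append]
    by_cases hpk : p < k
    · rw [ih hpk]; rfl
    · have hpk' : p = k := by omega
      subst hpk'
      rw [pv_find?_range_none (fun j hj => hmin j hj)]
      simp [List.find?, hq]

lemma pv_infix_of_prefix_drop {m s : List Char} {j : Nat} (h : m <+: s.drop j) : m <:+: s :=
  (PySem.Chars.isIn_iff_infix m s).1 ((PySem.Chars.exists_prefix_drop_iff_isIn m s).1 ⟨j, h⟩)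

-- a positive hit for m yields an occurrence of '\n'::m one position earlier
lemma pv_nl_of_hit {m s : List Char} {q : Nat} (h : pvHitM m true s (q + 1) = true) :
    ('\n' :: m) <+: s.drop q := by
  simp only [pvHitM, Nat.add_sub_cancel, if_neg (Nat.succ_ne_zero q), Bool.and_eq_true,
    beq_iff_eq, List.isPrefixOf_iff_prefix] at h
  obtain ⟨h1, h2⟩ := h
  have hq : q < s.length := (List.getElem?_eq_some_iff.mp h1).1
  have hsq : s[q] = '\n' := by
    have := (List.getElem?_eq_some_iff.mp h1).2
    exact this
  have hds : s.drop q = '\n' :: s.drop (q + 1) := by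
    rw [← List.getElem_cons_drop hq, hsq]
  rw [hds]
  exact List.cons_prefix_cons.mpr ⟨rfl, h2⟩

lemma pv_isPrefixOf_false {m s : List Char} (hP : ¬ m <+: s) : m.isPrefixOf s = false := by
  rw [Bool.eq_false_iff]
  intro hc
  exact hP (List.isPrefixOf_iff_prefix.mp hc)

-- marker absent (no prefix, find = -1): no hits at all
lemma pvHitM_none {m s : List Char} (hP : ¬ m <+: s)
    (hI : PySem.Chars.find s ('\n' :: m) = -1) : ∀ p, pvHitM m true s p = false := by
  intro p
  cases p with
  | zero => simp [pvHitM, pv_isPrefixOf_false hP]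
  | succ q =>
    by_contra hcon
    rw [Bool.not_eq_false] at hcon
    exact (PySem.Chars.find_eq_neg_one_iff s ('\n' :: m)).mp hI
      (pv_infix_of_prefix_drop (pv_nl_of_hit hcon))

lemma pvHitM_zero_false {m s : List Char} (hP : ¬ m <+: s) :
    pvHitM m true s 0 = false := by
  simp [pvHitM, pv_isPrefixOf_false hP]

lemma pvHitM_zero_true {m s : List Char} (hP : m <+: s) :
    pvHitM m true s 0 = true := by
  simp [pvHitM, List.isPrefixOf_iff_prefix, hP]

-- find ≥ 0: hit exactly at find+1 and nowhere in 1..find; find+1 is inside the string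
lemma pvHitM_find {m s : List Char} (hm : m ≠ []) (h : 0 ≤ PySem.Chars.find s ('\n' :: m)) :
    pvHitM m true s ((PySem.Chars.find s ('\n' :: m)).toNat + 1) = true ∧
    ((PySem.Chars.find s ('\n' :: m)).toNat + 1) < s.length ∧
    ∀ j, 0 < j → j < (PySem.Chars.find s ('\n' :: m)).toNat + 1 → pvHitM m true s j = false := by
  obtain ⟨hpre, hmin⟩ := PySem.Chars.find_spec h
  obtain ⟨u, hu⟩ := hpre
  set g : Nat := (PySem.Chars.find s ('\n' :: m)).toNat with hg
  have hget : s[g]? = some '\n' := by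
    have h0 : (s.drop g)[0]? = some '\n' := by rw [← hu]; rfl
    rw [List.getElem?_drop] at h0
    simpa using h0
  have hglen : g < s.length := (List.getElem?_eq_some_iff.mp hget).1
  have hdrop : s.drop (g + 1) = m ++ u := by
    have h1 : s.drop (g + 1) = (s.drop g).drop 1 := by
      rw [List.drop_drop, Nat.add_comm]
    rw [h1, ← hu]
    rfl
  refine ⟨?_, ?_, ?_⟩
  · simp [pvHitM, hget, hdrop, List.isPrefixOf_iff_prefix, List.prefix_append]
  · have hne : s.drop (g + 1) ≠ [] := by
      rw [hdrop]
      simp [hm]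
    rw [ne_eq, List.drop_eq_nil_iff] at hne
    omega
  · intro j hj0 hjlt
    cases j with
    | zero => omega
    | succ q =>
      by_contra hcon
      rw [Bool.not_eq_false] at hcon
      exact hmin q (by omega) (pv_nl_of_hit hcon)

lemma pv_not_both {s : List Char} (h1 : pvM1 <+: s) (h2 : pvM2 <+: s) : False := by
  obtain ⟨u, hu⟩ := h1
  obtain ⟨v, hv⟩ := h2
  rw [← hu] at hv
  have h0 : (pvM2 ++ v)[0]? = (pvM1 ++ u)[0]? := by rw [hv]
  rw [List.getElem?_append_left (by decide), List.getElem?_append_left (by decide)] at h0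
  exact absurd h0 (by decide)

lemma pvMin2 (x y : Int) :
    PySem.List.min? [x, y] (fun v => v) = some (if y < x then y else x) := by
  simp only [PySem.List.min?, List.foldl]
  split <;> rfl

lemma pvD_iff (text : String) : D_find_first_diff_start_py text ↔
    ((pvM1 <+: text.toList ∧ ('\n' :: pvM1) <:+: text.toList) ∨
     (pvM2 <+: text.toList ∧ ('\n' :: pvM2) <:+: text.toList)) := by
  unfold D_find_first_diff_start_py
  rw [PySem.Str.startswith_eq, PySem.Str.startswith_eq, PySem.Str.isIn_eq, PySem.Str.isIn_eq,
    PySem.Chars.isIn_iff_infix, PySem.Chars.isIn_iff_infix,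
    PySem.Chars.startswith_iff, PySem.Chars.startswith_iff, pvnl1, pvnl2]
  rfl

lemma pvMin1 (x : Int) : PySem.List.min? [x] (fun v => v) = some x := by
  simp [PySem.List.min?, List.foldl]

lemma pvMin0 : PySem.List.min? ([] : List Int) (fun v => v) = none := rfl

lemma pv_filter_pair (x y : Int) :
    ([x, y]).filter (fun i => decide (0 ≤ i)) =
      if 0 ≤ x then (if 0 ≤ y then [x, y] else [x]) else (if 0 ≤ y then [y] else []) := by
  by_cases hx : 0 ≤ x <;> by_cases hy : 0 ≤ y <;> simp [List.filter, hx, hy]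

lemma pv_len_pos {s : List Char} (h : pvM1 <+: s ∨ pvM2 <+: s) : 0 < s.length := by
  have h11 : pvM1.length = 11 := by decide
  have h6 : pvM2.length = 6 := by decide
  rcases h with h | h
  · have := h.length_le; omega
  · have := h.length_le; omega

lemma pv_rhs_zero {s : List Char} (hP : pvM1 <+: s ∨ pvM2 <+: s) :
    ((List.range s.length).find? (pvHit true s)).map (fun p => (p : Int) + 0) = some 0 := by
  have h0 : pvHit true s 0 = true := by
    rcases hP with h | h
    · simp [pvHit, pvHitM_zero_true h]
    · simp [pvHit, pvHitM_zero_true h]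
  rw [pv_find?_range_some (pv_len_pos hP) h0 (fun j hj => absurd hj (Nat.not_lt_zero j))]
  simp

-- the main list-level equality, outside the change region
lemma pv_main (s : List Char)
    (h1 : ¬ (pvM1 <+: s ∧ ('\n' :: pvM1) <:+: s))
    (h2 : ¬ (pvM2 <+: s ∧ ('\n' :: pvM2) <:+: s)) :
    pvACore s = ((List.range s.length).find? (pvHit true s)).map (fun p => (p : Int) + 0) := by
  have hb1 := PySem.Chars.neg_one_le_find s ('\n' :: pvM1)
  have hb2 := PySem.Chars.neg_one_le_find s ('\n' :: pvM2)
  unfold pvACore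
  by_cases hI1 : PySem.Chars.find s ('\n' :: pvM1) = -1
  · by_cases hI2 : PySem.Chars.find s ('\n' :: pvM2) = -1
    · -- both finds fail: A's value is 0 if a marker is a prefix, else none
      by_cases hP1 : pvM1 <+: s
      · rw [pvCand_zero hP1 hI1, pvCand_abs (fun h => pv_not_both hP1 h) hI2,
          pv_filter_pair, if_pos (by omega), if_neg (by omega), pvMin1,
          pv_rhs_zero (Or.inl hP1)]
      · by_cases hP2 : pvM2 <+: s
        · rw [pvCand_abs hP1 hI1, pvCand_zero hP2 hI2, pv_filter_pair,
            if_neg (by omega), if_pos (by omega), pvMin1, pv_rhs_zero (Or.inr hP2)]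
        · rw [pvCand_abs hP1 hI1, pvCand_abs hP2 hI2, pv_filter_pair,
            if_neg (by omega), if_neg (by omega), pvMin0,
            pv_find?_range_none (fun j _ => by
              simp [pvHit, pvHitM_none hP1 hI1 j, pvHitM_none hP2 hI2 j])]
          rfl
    · -- find 1 fails, find 2 succeeds
      have hge2 : 0 ≤ PySem.Chars.find s ('\n' :: pvM2) := by omega
      obtain ⟨hhit2, hlen2, hmin2⟩ := pvHitM_find pvM2_ne_nil hge2
      by_cases hP1 : pvM1 <+: s
      · rw [pvCand_zero hP1 hI1, pvCand_pos hI2, pv_filter_pair, if_pos (by omega),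
          if_pos (by omega), pvMin2, if_neg (by omega), pv_rhs_zero (Or.inl hP1)]
      · have hP2 : ¬ pvM2 <+: s :=
          fun hp => h2 ⟨hp, (PySem.Chars.find_nonneg_iff s _).mp hge2⟩
        rw [pvCand_abs hP1 hI1, pvCand_pos hI2, pv_filter_pair, if_neg (by omega),
          if_pos (by omega), pvMin1]
        rw [pv_find?_range_some hlen2 (by simp [pvHit, hhit2]) (fun j hj => by
          cases j with
          | zero => simp [pvHit, pvHitM_zero_false hP1, pvHitM_zero_false hP2]
          | succ q => simp [pvHit, pvHitM_none hP1 hI1, hmin2 (q + 1) (by omega) hj])]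
        simp
        omega
  · -- find 1 succeeds
    have hge1 : 0 ≤ PySem.Chars.find s ('\n' :: pvM1) := by omega
    obtain ⟨hhit1, hlen1, hmin1⟩ := pvHitM_find pvM1_ne_nil hge1
    have hP1 : ¬ pvM1 <+: s :=
      fun hp => h1 ⟨hp, (PySem.Chars.find_nonneg_iff s _).mp hge1⟩
    by_cases hI2 : PySem.Chars.find s ('\n' :: pvM2) = -1
    · by_cases hP2 : pvM2 <+: s
      · rw [pvCand_pos hI1, pvCand_zero hP2 hI2, pv_filter_pair, if_pos (by omega),
          if_pos (by omega), pvMin2, if_pos (by omega), pv_rhs_zero (Or.inr hP2)]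
      · rw [pvCand_pos hI1, pvCand_abs hP2 hI2, pv_filter_pair, if_pos (by omega),
          if_neg (by omega), pvMin1]
        rw [pv_find?_range_some hlen1 (by simp [pvHit, hhit1]) (fun j hj => by
          cases j with
          | zero => simp [pvHit, pvHitM_zero_false hP1, pvHitM_zero_false hP2]
          | succ q => simp [pvHit, pvHitM_none hP2 hI2, hmin1 (q + 1) (by omega) hj])]
        simp
        omega
    · -- both finds succeed: the earlier of the two wins
      have hge2 : 0 ≤ PySem.Chars.find s ('\n' :: pvM2) := by omega
      obtain ⟨hhit2, hlen2, hmin2⟩ := pvHitM_find pvM2_ne_nil hge2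
      have hP2 : ¬ pvM2 <+: s :=
        fun hp => h2 ⟨hp, (PySem.Chars.find_nonneg_iff s _).mp hge2⟩
      rw [pvCand_pos hI1, pvCand_pos hI2, pv_filter_pair, if_pos (by omega),
        if_pos (by omega), pvMin2]
      by_cases hlt : PySem.Chars.find s ('\n' :: pvM2) + 1 < PySem.Chars.find s ('\n' :: pvM1) + 1
      · rw [if_pos hlt]
        rw [pv_find?_range_some hlen2 (by simp [pvHit, hhit2]) (fun j hj => by
          cases j with
          | zero => simp [pvHit, pvHitM_zero_false hP1, pvHitM_zero_false hP2]
          | succ q =>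
            have hj1 : q + 1 < (PySem.Chars.find s ('\n' :: pvM1)).toNat + 1 := by omega
            simp [pvHit, hmin1 (q + 1) (by omega) hj1, hmin2 (q + 1) (by omega) hj])]
        simp
        omega
      · rw [if_neg hlt]
        rw [pv_find?_range_some hlen1 (by simp [pvHit, hhit1]) (fun j hj => by
          cases j with
          | zero => simp [pvHit, pvHitM_zero_false hP1, pvHitM_zero_false hP2]
          | succ q =>
            have hj2 : q + 1 < (PySem.Chars.find s ('\n' :: pvM2)).toNat + 1 := by omega
            simp [pvHit, hmin1 (q + 1) (by omega) hj, hmin2 (q + 1) (by omega) hj2])]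
        simp
        omega

-- ===== VERDICT (by name: the statement is the Claim_ definition above) =====
theorem find_first_diff_start_py_spec : Claim_unchanged_find_first_diff_start_py := by
  intro text _hdom
  unfold Spec_find_first_diff_start_py
  intro hnD
  rw [pvD_iff] at hnD
  rw [pvA_eq]
  simp only [find_first_diff_start_py_alt]
  rw [pvAltGo_eq]
  exact pv_main text.toList (fun h => hnD (Or.inl h)) (fun h => hnD (Or.inr h))

theorem find_first_diff_start_py_changed : Claim_changed_find_first_diff_start_py := by
  unfold Claim_changed_find_first_diff_start_py; decide

theorem find_first_diff_start_py_tight : Claim_exact_find_first_diff_start_py := by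
  intro text _hdom hD heq
  rw [pvD_iff] at hD
  have hP : pvM1 <+: text.toList ∨ pvM2 <+: text.toList := by
    rcases hD with ⟨h, _⟩ | ⟨h, _⟩
    · exact Or.inl h
    · exact Or.inr h
  have hB : find_first_diff_start_py_alt text = some 0 := by
    simp only [find_first_diff_start_py_alt]
    rw [pvAltGo_eq]
    exact pv_rhs_zero hP
  rw [pvA_eq, hB] at heq
  unfold pvACore at heq
  have hmem := PySem.List.min?_mem heq
  rw [List.mem_filter] at hmem
  have hmem1 : (0 : Int) ∈ [pvCand pvM1 text.toList, pvCand pvM2 text.toList] := hmem.1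
  simp only [List.mem_cons, List.not_mem_nil, or_false] at hmem1
  have hb1 := PySem.Chars.neg_one_le_find text.toList ('\n' :: pvM1)
  have hb2 := PySem.Chars.neg_one_le_find text.toList ('\n' :: pvM2)
  rcases hD with ⟨hp1, hinf1⟩ | ⟨hp2, hinf2⟩
  · have hge1 : 0 ≤ PySem.Chars.find text.toList ('\n' :: pvM1) :=
      (PySem.Chars.find_nonneg_iff _ _).mpr hinf1
    have hnp2 : ¬ pvM2 <+: text.toList := fun h => pv_not_both hp1 h
    rcases hmem1 with h | h
    · rw [pvCand_pos (by omega)] at h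
      omega
    · by_cases hI2 : PySem.Chars.find text.toList ('\n' :: pvM2) = -1
      · rw [pvCand_abs hnp2 hI2] at h
        omega
      · rw [pvCand_pos hI2] at h
        omega
  · have hge2 : 0 ≤ PySem.Chars.find text.toList ('\n' :: pvM2) :=
      (PySem.Chars.find_nonneg_iff _ _).mpr hinf2
    have hnp1 : ¬ pvM1 <+: text.toList := fun h => pv_not_both h hp2
    rcases hmem1 with h | h
    · by_cases hI1 : PySem.Chars.find text.toList ('\n' :: pvM1) = -1
      · rw [pvCand_abs hnp1 hI1] at h
        omega
      · rw [pvCand_pos hI1] at h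
        omega
    · rw [pvCand_pos (by omega)] at h
      omega
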